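-- pv_equiv track=rewrite | github.com/arhanh390-prog/email-emulator-server | email_simulator.py | check_numbers_in_words
-- ===== SOURCE A (Python) =====
-- def check_numbers_in_words(body_text):
--     """Finds common number words."""
--     number_words = [
--         "one", "two", "three", "four", "five", "six", "seven", "eight", "nine", "ten",
--         "hundred", "thousand", "million", "billion"
--     ]
--     body_lower = body_text.lower()
--     if any(word in body_lower for word in number_words):
--         return "Numbers in Words Detected"
--     return None
-- ===== SOURCE B (Python) =====
-- def check_numbers_in_words(body_text):
--     """Finds common number words."""
--     number_words = (
--         "one", "two", "three", "four", "five", "six", "seven", "eight", "nine", "ten",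
--         "hundred", "thousand", "million", "billion"
--     )
--     s = body_text.lower()
--     for i in range(len(s)):
--         if s.startswith(number_words, i):
--             return "Numbers in Words Detected"
--     return None
-- ===== Notes on version B (the rewrite author's own statement) =====
-- stated objective: alternative
-- what changed: Replaces 14 independent full-string substring scans (any(word in body_lower)) with a single left-to-right pass over the text that at each position tests whether any number word starts there (str.startswith with a tuple), returning on the first hit.
import Mathlib
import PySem

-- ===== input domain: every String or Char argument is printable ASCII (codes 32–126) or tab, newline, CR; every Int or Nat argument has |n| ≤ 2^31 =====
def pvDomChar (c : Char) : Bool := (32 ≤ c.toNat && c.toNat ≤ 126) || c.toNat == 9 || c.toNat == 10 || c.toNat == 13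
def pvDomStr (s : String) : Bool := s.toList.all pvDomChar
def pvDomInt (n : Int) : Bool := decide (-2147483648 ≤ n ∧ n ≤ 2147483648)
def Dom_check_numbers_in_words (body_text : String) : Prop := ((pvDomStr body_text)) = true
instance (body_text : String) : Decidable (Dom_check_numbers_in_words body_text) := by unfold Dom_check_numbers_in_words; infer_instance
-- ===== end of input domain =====

-- B replaces A's 14 independent whole-string substring scans with a single left-to-right
-- pass testing at each position whether any number word starts there (alternative decomposition).


-- ===== PORT A =====
def check_numbers_in_words (body_text : String) : Option String :=
  let number_words : List String :=
    ["one", "two", "three", "four", "five", "six", "seven", "eight", "nine", "ten",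
     "hundred", "thousand", "million", "billion"]
  let body_lower := PySem.Str.lower body_text
  if number_words.any (fun w => PySem.Str.isIn w body_lower) then
    some "Numbers in Words Detected"
  else
    none

-- ===== PORT B =====
def pvWordsB : List String :=
  ["one", "two", "three", "four", "five", "six", "seven", "eight", "nine", "ten",
   "hundred", "thousand", "million", "billion"]

-- the 'for i in range(len(s))' loop of Source B: walk the suffixes of s left to right,
-- s.startswith(number_words, i) = some word is a prefix of the i-th suffix
def pvScan : List Char → Option String
  | [] => none
  | c :: rest =>
    if pvWordsB.any (fun w => w.toList.isPrefixOf (c :: rest)) then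
      some "Numbers in Words Detected"
    else
      pvScan rest

def check_numbers_in_words_alt (body_text : String) : Option String :=
  pvScan (PySem.Chars.lower body_text.toList)

-- ===== PRECONDITION & SPEC =====
def Spec_check_numbers_in_words (body_text : String) (out : Option String) : Prop := out = check_numbers_in_words_alt body_text
instance (body_text : String) (out : Option String) : Decidable (Spec_check_numbers_in_words body_text out) := by unfold Spec_check_numbers_in_words; infer_instance

-- ===== CLAIM (what is proved, stated in full; the proofs are below) =====
def Claim_equal_check_numbers_in_words : Prop := ∀ (body_text : String), Dom_check_numbers_in_words body_text → Spec_check_numbers_in_words body_text (check_numbers_in_words body_text)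

-- ===== LEMMAS AND PROOFS =====

-- 'w in (c :: rest)' splits into 'w is a prefix here' or 'w in rest'
lemma pv_isIn_cons (w : List Char) (c : Char) (rest : List Char) :
    PySem.Chars.isIn w (c :: rest) = (w.isPrefixOf (c :: rest) || PySem.Chars.isIn w rest) := by
  apply Bool.eq_iff_iff.mpr
  simp only [Bool.or_eq_true, PySem.Chars.isIn_iff_infix,
    List.isPrefixOf_iff_prefix, List.infix_cons_iff]

-- the single pass computes exactly A's 'any word is a substring'
lemma pvScan_eq (l : List Char) :
    pvScan l = if pvWordsB.any (fun w => PySem.Chars.isIn w.toList l) then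
        some "Numbers in Words Detected" else none := by
  induction l with
  | nil => decide
  | cons c rest ih =>
    rw [pvScan, ih]
    by_cases h : pvWordsB.any (fun w => w.toList.isPrefixOf (c :: rest)) = true
    · have : pvWordsB.any (fun w => PySem.Chars.isIn w.toList (c :: rest)) = true := by
        rcases List.any_eq_true.mp h with ⟨w, hw, hp⟩
        exact List.any_eq_true.mpr ⟨w, hw, by rw [pv_isIn_cons, hp]; rfl⟩
      simp [h, this]
    · have hb : ∀ w ∈ pvWordsB, w.toList.isPrefixOf (c :: rest) = false := by
        intro w hw
        by_contra hc
        exact h (List.any_eq_true.mpr ⟨w, hw, by revert hc; cases w.toList.isPrefixOf (c :: rest) <;> simp⟩)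
      have : (pvWordsB.any (fun w => PySem.Chars.isIn w.toList (c :: rest)))
           = (pvWordsB.any (fun w => PySem.Chars.isIn w.toList rest)) := by
        apply Bool.eq_iff_iff.mpr
        simp only [List.any_eq_true]
        constructor
        · rintro ⟨w, hw, hx⟩
          refine ⟨w, hw, ?_⟩
          rw [pv_isIn_cons, hb w hw, Bool.false_or] at hx
          exact hx
        · rintro ⟨w, hw, hx⟩
          exact ⟨w, hw, by rw [pv_isIn_cons, hb w hw, Bool.false_or]; exact hx⟩
      simp [h, this]

-- ===== VERDICT (by name: the statement is the Claim_ definition above) =====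
theorem check_numbers_in_words_spec : Claim_equal_check_numbers_in_words := by
  intro body_text _
  unfold Spec_check_numbers_in_words check_numbers_in_words check_numbers_in_words_alt
  rw [pvScan_eq]
  simp only [PySem.Str.isIn_eq, PySem.Str.toList_lower]
  rfl
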